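-- pv_equiv track=rewrite | github.com/FYWinds/WynntilsResolver | wynntilsresolver/blocks/block.py | encode_variable_sized_int
-- ===== SOURCE A (Python) =====
-- from typing import List
--
-- def encode_variable_sized_int(num: int) -> List[int]:
--     """
--     Encode an integer using the variable-size encoding scheme.
--
--     The encoding scheme is as follows:
--     - The number is encoded using the ZigZag encoding scheme
--     - The most significant bit is used as a continuation bit
--     - The remaining 7 bits are then used to store the actual value
--     """
--     # ZigZag encoding
--     num = (num << 1) ^ (num >> 0x3F)
--
--     # Encode the integer
--     result = []
--     while num >= 0x80:
--         result.append((num & 0x7F) | 0x80)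
--         num >>= 7
--     result.append(num)
--     return result
-- ===== SOURCE B (Python) =====
-- from typing import List
--
--
-- def encode_variable_sized_int(num: int) -> List[int]:
--     """ZigZag value, then emit all 7-bit groups in one indexed pass:
--     the number of output bytes is computed up front from bit_length()."""
--     n = (num << 1) ^ (num >> 0x3F)
--     chunks = max(1, (n.bit_length() + 6) // 7)
--     return [((n >> (7 * i)) & 0x7F) | (0x80 if i < chunks - 1 else 0)
--             for i in range(chunks)]
-- ===== Notes on version B (the rewrite author's own statement) =====
-- stated objective: alternative
-- what changed: The destructive while-loop that repeatedly shifts the zigzag value is replaced by computing the output length up front from bit_length() and emitting every seven-bit group in a single index-based comprehension (non-destructive, length known before any byte is built).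
import Mathlib
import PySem

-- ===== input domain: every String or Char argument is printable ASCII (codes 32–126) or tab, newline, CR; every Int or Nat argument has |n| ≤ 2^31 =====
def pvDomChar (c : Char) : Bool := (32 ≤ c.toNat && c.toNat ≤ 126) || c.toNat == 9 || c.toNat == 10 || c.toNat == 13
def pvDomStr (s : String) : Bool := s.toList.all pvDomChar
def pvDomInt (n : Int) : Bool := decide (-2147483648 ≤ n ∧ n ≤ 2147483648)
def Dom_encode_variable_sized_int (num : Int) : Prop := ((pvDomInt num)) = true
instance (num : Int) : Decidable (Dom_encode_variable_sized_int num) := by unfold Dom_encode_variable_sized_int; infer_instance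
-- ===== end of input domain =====

-- B replaces A's destructive shifting while-loop by computing the byte count up front
-- from bit_length() and emitting every seven-bit group in one index-based pass (objective: alternative).

-- ===== PORT A =====
-- while num >= 0x80: result.append((num & 0x7F) | 0x80); num >>= 7  — then result.append(num)
def pvLoopA (n : Int) : List Int :=
  if _h : (0x80 : Int) ≤ n then
    PySem.Int.bor (PySem.Int.band n 0x7F) 0x80 :: pvLoopA (n >>> (7:Nat))
  else [n]
termination_by n.toNat
decreasing_by
  have hd : n >>> (7:Nat) = n / ((2:Nat) ^ 7 : Nat) := Int.shiftRight_eq_div_pow n 7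
  have h1 : n / 2 ^ 7 < n := by
    rw [Int.ediv_lt_iff_lt_mul (by norm_num)]
    nlinarith
  have h2 : (0:Int) ≤ n / 2 ^ 7 := Int.ediv_nonneg (by omega) (by norm_num)
  rw [hd]
  omega

def encode_variable_sized_int (num : Int) : List Int :=
  pvLoopA (PySem.Int.bxor (num <<< (1:Nat)) (num >>> (63:Nat)))

-- ===== PORT B =====
def encode_variable_sized_int_alt (num : Int) : List Int :=
  let n := PySem.Int.bxor (num <<< (1:Nat)) (num >>> (63:Nat))
  let chunks := max 1 ((PySem.Int.bitLength n + 6) / 7)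
  (List.range chunks).map (fun (i : Nat) =>
    PySem.Int.bor (PySem.Int.band (n >>> (7 * i)) 0x7F)
      (if i < chunks - 1 then 0x80 else 0))

-- ===== PRECONDITION & SPEC =====
def Spec_encode_variable_sized_int (num : Int) (out : List Int) : Prop := out = encode_variable_sized_int_alt num
instance (num : Int) (out : List Int) : Decidable (Spec_encode_variable_sized_int num out) := by unfold Spec_encode_variable_sized_int; infer_instance

-- ===== CLAIM (what is proved, stated in full; the proofs are below) =====
def Claim_equal_encode_variable_sized_int : Prop := ∀ (num : Int), Dom_encode_variable_sized_int num → Spec_encode_variable_sized_int num (encode_variable_sized_int num)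

-- ===== LEMMAS AND PROOFS =====

-- number of output bytes B computes
def pvChunks (n : Int) : Nat := max 1 ((PySem.Int.bitLength n + 6) / 7)

theorem pv_bxor_neg_one (a : Int) : PySem.Int.bxor a (-1) = -a - 1 := by
  simp [PySem.Int.bxor]
  split_ifs with h <;> omega

theorem pv_band127 (n : Int) (h0 : 0 ≤ n) (h : n < 128) : PySem.Int.band n 127 = n := by
  rw [PySem.Int.band_of_nonneg h0 (by norm_num)]
  have h127 : Int.toNat 127 = 2 ^ 7 - 1 := rfl
  rw [h127, Nat.and_two_pow_sub_one_eq_mod]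
  omega

theorem pv_bl_le (n : Int) (h0 : 0 ≤ n) (h : n < 128) : PySem.Int.bitLength n ≤ 7 := by
  rcases eq_or_lt_of_le h0 with h1 | h1
  · simp [← h1]
  · have h2 := PySem.Int.two_pow_bitLength_le n (by omega)
    by_contra hc
    have h3 : (2:Nat) ^ 7 ≤ 2 ^ (PySem.Int.bitLength n - 1) :=
      Nat.pow_le_pow_right (by norm_num) (by omega)
    omega

theorem pv_bl_ge (n : Int) (h : (128:Int) ≤ n) : 8 ≤ PySem.Int.bitLength n := by
  have h1 := PySem.Int.lt_two_pow_bitLength n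
  by_contra hc
  have h2 : (2:Nat) ^ PySem.Int.bitLength n ≤ 2 ^ 7 :=
    Nat.pow_le_pow_right (by norm_num) (by omega)
  omega

theorem pv_bl_shiftRight (k : Nat) : ∀ n : Int, 0 ≤ n →
    PySem.Int.bitLength (n >>> k) = PySem.Int.bitLength n - k := by
  induction k with
  | zero => intro n _; simp
  | succ k ih =>
    intro n h0
    rcases eq_or_lt_of_le h0 with h | h
    · simp [← h]
    · have hstep : n >>> (k + 1) = (n / 2) >>> k := by
        rw [Int.shiftRight_eq_div_pow, Int.shiftRight_eq_div_pow,
          Int.ediv_ediv_of_nonneg (by norm_num : (0:Int) ≤ 2)]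
        push_cast
        ring_nf
      have hbl : PySem.Int.bitLength n = PySem.Int.bitLength (n / 2) + 1 := by
        rw [PySem.Int.bitLength_of_pos h, PySem.Int.floordiv_eq_ediv_of_pos (by norm_num)]
      have := ih (n / 2) (Int.ediv_nonneg h0 (by norm_num))
      rw [hstep, this, hbl]
      omega

theorem pv_shift_shift (n : Int) (j k : Nat) : (n >>> j) >>> k = n >>> (j + k) := by
  rw [Int.shiftRight_eq_div_pow, Int.shiftRight_eq_div_pow, Int.shiftRight_eq_div_pow,
    Int.ediv_ediv_of_nonneg (by positivity : (0:Int) ≤ ((2:Nat) ^ j : Nat))]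
  push_cast
  ring_nf

theorem pv_loopA_eq (m : Nat) : ∀ n : Int, 0 ≤ n → n.toNat ≤ m →
    pvLoopA n = (List.range (pvChunks n)).map (fun (i : Nat) =>
      PySem.Int.bor (PySem.Int.band (n >>> (7 * i)) 0x7F)
        (if i < pvChunks n - 1 then 0x80 else 0)) := by
  induction m with
  | zero =>
    intro n h0 hm
    have hn : n = 0 := by omega
    subst hn
    rw [pvLoopA]
    norm_num [pvChunks]
    decide
  | succ m ih =>
    intro n h0 hm
    by_cases h : (0x80 : Int) ≤ n
    · -- loop iterates: n' = n >>> (7:Nat)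
      have hd : n >>> (7:Nat) = n / ((2:Nat) ^ 7 : Nat) := Int.shiftRight_eq_div_pow n 7
      have hlt : n / 2 ^ 7 < n := by
        rw [Int.ediv_lt_iff_lt_mul (by norm_num)]
        nlinarith
      have hn' : (0:Int) ≤ n >>> (7:Nat) := by
        rw [hd]; exact Int.ediv_nonneg (by omega) (by norm_num)
      have hm' : (n >>> (7:Nat)).toNat ≤ m := by rw [hd]; omega
      have hbl8 := pv_bl_ge n h
      have hbl' := pv_bl_shiftRight 7 n h0
      have hc1 : 1 ≤ pvChunks (n >>> (7:Nat)) := le_max_left _ _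
      have hcs : pvChunks n = pvChunks (n >>> (7:Nat)) + 1 := by
        unfold pvChunks
        rw [hbl']
        omega
      rw [pvLoopA]
      simp only [h, dite_true, ih (n >>> (7:Nat)) hn' hm']
      rw [hcs, List.range_succ_eq_map, List.map_cons, List.map_map]
      simp only [List.cons.injEq]
      constructor
      · -- heads agree
        have h0c : (0 : Nat) < pvChunks (n >>> (7:Nat)) + 1 - 1 := by omega
        simp only [Nat.mul_zero, if_pos h0c]
        norm_num
      · -- tails agree
        apply List.map_congr_left
        intro i _
        simp only [Function.comp_apply, Nat.succ_eq_add_one]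
        rw [show 7 * (i + 1) = 7 + 7 * i by ring, ← pv_shift_shift]
        have hif : (if i + 1 < pvChunks (n >>> (7:Nat)) + 1 - 1 then (0x80:Int) else 0)
            = (if i < pvChunks (n >>> (7:Nat)) - 1 then 0x80 else 0) := by
          split_ifs with h1 h2 <;> omega
        rw [hif]
    · -- loop exits: 0 ≤ n < 128, one byte
      have hbl := pv_bl_le n h0 (by omega)
      have hc : pvChunks n = 1 := by unfold pvChunks; omega
      rw [pvLoopA]
      simp only [h, dite_false, hc, List.range_one, List.map_cons, List.map_nil]
      rw [Nat.mul_zero, Int.shiftRight_zero, pv_band127 n h0 (by omega)]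
      simp

-- ===== VERDICT (by name: the statement is the Claim_ definition above) =====
theorem encode_variable_sized_int_spec : Claim_equal_encode_variable_sized_int := by
  intro num hdom
  have hb : -2147483648 ≤ num ∧ num ≤ 2147483648 := by
    have := of_decide_eq_true hdom
    exact this
  -- the zigzag value is nonnegative on the domain
  have hz : 0 ≤ PySem.Int.bxor (num <<< (1:Nat)) (num >>> (63:Nat)) := by
    have hsl : num <<< (1:Nat) = num * 2 := by rw [Int.shiftLeft_eq]; ring
    have hsr : num >>> (63:Nat) = num / ((2:Nat) ^ 63 : Nat) := Int.shiftRight_eq_div_pow num 63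
    by_cases hpos : 0 ≤ num
    · have h0 : num >>> (63:Nat) = 0 := by
        rw [hsr]; exact Int.ediv_eq_zero_of_lt hpos (by omega)
      rw [h0]
      simp [hsl]
      omega
    · have h1 : num >>> (63:Nat) = -1 := by
        rw [hsr]
        push_cast
        rw [← PySem.Int.floordiv_eq_ediv_of_pos (b := 9223372036854775808) (by norm_num)]
        rw [PySem.Int.floordiv_eq_iff_of_pos (by norm_num)]
        omega
      rw [h1, pv_bxor_neg_one, hsl]
      omega
  unfold Spec_encode_variable_sized_int encode_variable_sized_int encode_variable_sized_int_alt
  exact pv_loopA_eq (PySem.Int.bxor (num <<< (1:Nat)) (num >>> (63:Nat))).toNat _ hz le_rfl
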